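-- pv_equiv track=rewrite | github.com/goessl/vector | vector/sparse/utility.py | vecseq
-- ===== SOURCE A (Python) =====
-- def vecseq(v, w):
--     r"""Return whether two vectors are equal.
--
--     $$
--         \vec{v} \overset{?}{=} \vec{w}
--     $$
--
--     Complexity
--     ----------
--     For two vectors of lengths $n$ & $m$ there will be at most
--
--     - $\min\{n, m\}$ scalar comparisons (`eq`) &
--     - $|n-m|$ scalar boolean evaluations (`bool`).
--     """
--     for k in v.keys() | w.keys():
--         if k not in w:
--             if bool(v[k]):
--                 return False
--         elif k not in v:
--             if bool(w[k]):
--                 return False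
--         else:
--             if not v[k]==w[k]:
--                 return False
--     return True
-- ===== SOURCE B (Python) =====
-- def vecseq(v, w):
--     vn = {k: x for k, x in v.items() if x}
--     wn = {k: x for k, x in w.items() if x}
--     return vn == wn
-- ===== Notes on version B (the rewrite author's own statement) =====
-- stated objective: simpler
-- what changed: Replaces the three-branch scan over the key-set union by building canonical nonzero dicts for both vectors and comparing them with one structural dict equality.
import Mathlib
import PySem

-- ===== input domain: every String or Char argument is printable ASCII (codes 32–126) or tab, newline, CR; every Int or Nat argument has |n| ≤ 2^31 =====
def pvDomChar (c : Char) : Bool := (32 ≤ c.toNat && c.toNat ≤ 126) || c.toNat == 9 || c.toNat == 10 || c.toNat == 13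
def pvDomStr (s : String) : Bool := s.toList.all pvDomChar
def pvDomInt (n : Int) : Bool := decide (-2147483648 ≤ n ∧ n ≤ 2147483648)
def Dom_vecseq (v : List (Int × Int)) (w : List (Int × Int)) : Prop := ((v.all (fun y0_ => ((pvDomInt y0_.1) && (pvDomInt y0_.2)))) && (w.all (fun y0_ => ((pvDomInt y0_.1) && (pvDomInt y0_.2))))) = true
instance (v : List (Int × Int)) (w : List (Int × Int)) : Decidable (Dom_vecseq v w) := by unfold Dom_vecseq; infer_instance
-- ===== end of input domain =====

-- B replaces A's three-branch scan over the key-set union by building canonical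
-- nonzero dicts of both vectors and comparing them with one dict equality (objective: simpler).

-- ===== PORT A =====
def vecseq (v : List (Int × Int)) (w : List (Int × Int)) : Bool :=
  let dv := PySem.Dict.ofList v
  let dw := PySem.Dict.ofList w
  -- 'for k in v.keys() | w.keys(): … return False / return True' = all keys pass;
  -- the result does not depend on the set's iteration order
  (PySem.Set.union (PySem.Set.ofList dv.keys) dw.keys).all (fun k =>
    if !dw.contains k then !(dv.getD k 0 != 0)
    else if !dv.contains k then !(dw.getD k 0 != 0)
    else dv.getD k 0 == dw.getD k 0)

-- ===== PORT B =====
def vecseq_alt (v : List (Int × Int)) (w : List (Int × Int)) : Bool :=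
  -- vn = {k: x for k, x in v.items() if x}  (dict comprehension = insert loop)
  let vn := ((PySem.Dict.ofList v).items.filter (fun p => p.2 != 0)).foldl
              (fun d p => d.insert p.1 p.2) PySem.Dict.empty
  let wn := ((PySem.Dict.ofList w).items.filter (fun p => p.2 != 0)).foldl
              (fun d p => d.insert p.1 p.2) PySem.Dict.empty
  -- Python dict == : same key→value mapping, insertion order ignored
  vn.size == wn.size && vn.items.all (fun p => wn.get? p.1 == some p.2)

-- ===== PRECONDITION & SPEC =====
def Spec_vecseq (v : List (Int × Int)) (w : List (Int × Int)) (out : Bool) : Prop := out = vecseq_alt v w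
instance (v : List (Int × Int)) (w : List (Int × Int)) (out : Bool) : Decidable (Spec_vecseq v w out) := by unfold Spec_vecseq; infer_instance

-- ===== CLAIM (what is proved, stated in full; the proofs are below) =====
def Claim_equal_vecseq : Prop := ∀ (v : List (Int × Int)) (w : List (Int × Int)), Dom_vecseq v w → Spec_vecseq v w (vecseq v w)

-- ===== LEMMAS AND PROOFS =====

-- the canonical nonzero dict built by B
def nzd (v : List (Int × Int)) : PySem.Dict Int Int :=
  ((PySem.Dict.ofList v).items.filter (fun p => p.2 != 0)).foldl
    (fun d p => d.insert p.1 p.2) PySem.Dict.empty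

theorem vecseq_alt_eq_nzd (v w : List (Int × Int)) :
    vecseq_alt v w =
      ((nzd v).size == (nzd w).size
        && (nzd v).items.all (fun p => (nzd w).get? p.1 == some p.2)) := rfl

theorem filter_keys_nodup (v : List (Int × Int)) :
    (((PySem.Dict.ofList v).items.filter (fun p => p.2 != 0)).map Prod.fst).Nodup := by
  have hsub : (((PySem.Dict.ofList v).items.filter (fun p => p.2 != 0)).map Prod.fst).Sublist
      ((PySem.Dict.ofList v).items.map Prod.fst) :=
    List.Sublist.map _ List.filter_sublist
  have hkeys : (PySem.Dict.ofList v).keys.Nodup := PySem.Dict.nodup_keys_ofList v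
  simp only [PySem.Dict.keys] at hkeys
  exact hkeys.sublist hsub

theorem nzd_items (v : List (Int × Int)) :
    (nzd v).items = (PySem.Dict.ofList v).items.filter (fun p => p.2 != 0) := by
  unfold nzd
  have h := PySem.Dict.items_foldl_insert_fresh
      ((PySem.Dict.ofList v).items.filter (fun p => p.2 != 0)) Prod.fst Prod.snd
      PySem.Dict.empty (fun a _ => rfl) (filter_keys_nodup v)
  simpa using h

theorem nzd_keys_nodup (v : List (Int × Int)) : (nzd v).keys.Nodup := by
  simp only [PySem.Dict.keys, nzd_items]
  exact filter_keys_nodup v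

theorem nzd_get? (v : List (Int × Int)) (k : Int) :
    (nzd v).get? k =
      if (PySem.Dict.ofList v).getD k 0 = 0 then none
      else some ((PySem.Dict.ofList v).getD k 0) := by
  have hnd := nzd_keys_nodup v
  have hdv : (PySem.Dict.ofList v).keys.Nodup := PySem.Dict.nodup_keys_ofList v
  cases h : (PySem.Dict.ofList v).get? k with
  | none =>
      have hg : (PySem.Dict.ofList v).getD k 0 = 0 := by
        rw [PySem.Dict.getD_eq_get?_getD, h]; rfl
      rw [hg, if_pos rfl]
      cases hn : (nzd v).get? k with
      | none => rfl
      | some x =>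
          exfalso
          have hm := PySem.Dict.mem_items_of_get?_eq_some _ hn
          rw [nzd_items] at hm
          have hm' := List.mem_of_mem_filter hm
          have := PySem.Dict.get?_of_mem_items _ hm' hdv
          simp [h] at this
  | some a =>
      have hg : (PySem.Dict.ofList v).getD k 0 = a := by
        rw [PySem.Dict.getD_eq_get?_getD, h]; rfl
      rw [hg]
      by_cases ha : a = 0
      · subst ha
        rw [if_pos rfl]
        cases hn : (nzd v).get? k with
        | none => rfl
        | some x =>
            exfalso
            have hm := PySem.Dict.mem_items_of_get?_eq_some _ hn
            rw [nzd_items, List.mem_filter] at hm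
            have := PySem.Dict.get?_of_mem_items _ hm.1 hdv
            rw [h] at this
            have hx : x = 0 := by injection this with h'; omega
            simp [hx] at hm
      · rw [if_neg ha]
        have hm : (k, a) ∈ (nzd v).items := by
          rw [nzd_items, List.mem_filter]
          exact ⟨PySem.Dict.mem_items_of_get?_eq_some _ h, by simp [ha]⟩
        exact PySem.Dict.get?_of_mem_items _ hm hnd

theorem A_char (v w : List (Int × Int)) :
    vecseq v w = true ↔
      ∀ k, (PySem.Dict.ofList v).getD k 0 = (PySem.Dict.ofList w).getD k 0 := by
  have hdv : (PySem.Dict.ofList v).keys.Nodup := PySem.Dict.nodup_keys_ofList v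
  simp only [vecseq, List.all_eq_true]
  constructor
  · intro h k
    by_cases hv : (PySem.Dict.ofList v).contains k = true
    · have hk : k ∈ PySem.Set.union (PySem.Set.ofList (PySem.Dict.ofList v).keys)
          (PySem.Dict.ofList w).keys := by
        rw [PySem.Set.mem_union, PySem.Set.mem_ofList]
        exact Or.inl ((PySem.Dict.contains_iff_mem_keys _ _).1 hv)
      have := h k hk
      by_cases hw : (PySem.Dict.ofList w).contains k = true
      · simp [hv, hw] at this
        simpa using this
      · have hw' : (PySem.Dict.ofList w).contains k = false := by
          cases hcw : (PySem.Dict.ofList w).contains k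
          · rfl
          · exact absurd hcw hw
        rw [PySem.Dict.getD_of_not_contains _ 0 hw']
        simp [hw'] at this
        simpa using this
    · have hv' : (PySem.Dict.ofList v).contains k = false := by
        cases hcv : (PySem.Dict.ofList v).contains k
        · rfl
        · exact absurd hcv hv
      rw [PySem.Dict.getD_of_not_contains _ 0 hv']
      by_cases hw : (PySem.Dict.ofList w).contains k = true
      · have hk : k ∈ PySem.Set.union (PySem.Set.ofList (PySem.Dict.ofList v).keys)
            (PySem.Dict.ofList w).keys := by
          rw [PySem.Set.mem_union]
          exact Or.inr ((PySem.Dict.contains_iff_mem_keys _ _).1 hw)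
        have := h k hk
        simp [hv', hw] at this
        omega
      · have hw' : (PySem.Dict.ofList w).contains k = false := by
          cases hcw : (PySem.Dict.ofList w).contains k
          · rfl
          · exact absurd hcw hw
        rw [PySem.Dict.getD_of_not_contains _ 0 hw']
  · intro h k _
    by_cases hw : (PySem.Dict.ofList w).contains k = true
    · by_cases hv : (PySem.Dict.ofList v).contains k = true
      · simp [hv, hw, h k]
      · have hv' : (PySem.Dict.ofList v).contains k = false := by
          cases hcv : (PySem.Dict.ofList v).contains k
          · rfl
          · exact absurd hcv hv
        have h0 : (PySem.Dict.ofList w).getD k 0 = 0 := by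
          rw [← h k, PySem.Dict.getD_of_not_contains _ 0 hv']
        simp [hv', hw, h0]
    · have hw' : (PySem.Dict.ofList w).contains k = false := by
        cases hcw : (PySem.Dict.ofList w).contains k
        · rfl
        · exact absurd hcw hw
      have h0 : (PySem.Dict.ofList v).getD k 0 = 0 := by
        rw [h k, PySem.Dict.getD_of_not_contains _ 0 hw']
      simp [hw', h0]

theorem mem_keys_iff_get?_ne_none (d : PySem.Dict Int Int) (a : Int) :
    a ∈ d.keys ↔ d.get? a ≠ none := by
  simp [ne_eq, PySem.Dict.get?_eq_none_iff_not_mem_keys]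

theorem B_char (v w : List (Int × Int)) :
    vecseq_alt v w = true ↔ ∀ k, (nzd v).get? k = (nzd w).get? k := by
  rw [vecseq_alt_eq_nzd]
  have hv := nzd_keys_nodup v
  have hw := nzd_keys_nodup w
  simp only [Bool.and_eq_true, beq_iff_eq, List.all_eq_true]
  constructor
  · rintro ⟨hs, hall⟩ k
    cases hk : (nzd v).get? k with
    | some x =>
        have hm := PySem.Dict.mem_items_of_get?_eq_some _ hk
        exact (hall _ hm).symm
    | none =>
        cases hk2 : (nzd w).get? k with
        | none => rfl
        | some y =>
            exfalso
            -- vn.keys ⊆ wn.keys, same length, both Nodup ⇒ same key set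
            have hsub : (nzd v).keys ⊆ (nzd w).keys := by
              intro k' hk'
              cases hg : (nzd v).get? k' with
              | none =>
                  exact absurd hk' ((PySem.Dict.get?_eq_none_iff_not_mem_keys _ _).1 hg)
              | some x' =>
                  have h2 := hall _ (PySem.Dict.mem_items_of_get?_eq_some _ hg)
                  rw [mem_keys_iff_get?_ne_none, h2]
                  simp
            have hlen : (nzd w).keys.length ≤ (nzd v).keys.length := by
              have h1 : (nzd v).keys.length = (nzd v).items.length := by
                simp [PySem.Dict.keys]
              have h2 : (nzd w).keys.length = (nzd w).items.length := by
                simp [PySem.Dict.keys]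
              simp only [PySem.Dict.size] at hs
              omega
            have hperm : (nzd v).keys.Perm (nzd w).keys :=
              (List.subperm_of_subset hv hsub).perm_of_length_le hlen
            have hkm : k ∈ (nzd v).keys := by
              rw [hperm.mem_iff, mem_keys_iff_get?_ne_none, hk2]
              simp
            rw [PySem.Dict.get?_eq_none_iff_not_mem_keys] at hk
            exact hk hkm
  · intro h
    constructor
    · have hperm : (nzd v).keys.Perm (nzd w).keys := by
        rw [List.perm_ext_iff_of_nodup hv hw]
        intro a
        rw [mem_keys_iff_get?_ne_none, mem_keys_iff_get?_ne_none, h a]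
      have := hperm.length_eq
      simp only [PySem.Dict.size, PySem.Dict.keys, List.length_map] at this ⊢
      exact this
    · intro p hp
      rw [← h p.1]
      exact PySem.Dict.get?_of_mem_items _ hp hv

-- ===== VERDICT (by name: the statement is the Claim_ definition above) =====
theorem vecseq_spec : Claim_equal_vecseq := by
  intro v w _
  unfold Spec_vecseq
  rw [Bool.eq_iff_iff, A_char, B_char]
  apply forall_congr'
  intro k
  rw [nzd_get?, nzd_get?]
  constructor
  · intro h
    rw [h]
  · intro h
    split_ifs at h with h1 h2 h2 <;> simp_all
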